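-- pv_equiv track=rewrite | github.com/Petermbuzi84/school_timetable | entry/lesson.py | double_slot_available
-- ===== SOURCE A (Python) =====
-- def double_slot_available(lessons: list) -> bool:
--     last_index: int = -10
--     for i in range(len(lessons)):
--         lesson = lessons[i]
--         if lesson == "":
--             if last_index == i - 1:
--                 return True
--             last_index = i
--     return False
-- ===== SOURCE B (Python) =====
-- def double_slot_available(lessons: list) -> bool:
--     flags = "".join("1" if lesson == "" else "0" for lesson in lessons)
--     return "11" in flags
-- ===== Notes on version B (the rewrite author's own statement) =====
-- stated objective: alternative
-- what changed: Replaced A's stateful index scan carrying a last_index sentinel with two staged passes: encode each slot as a '1'/'0' flag character into a string, then answer by a substring search for "11" on that string.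
import Mathlib
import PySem

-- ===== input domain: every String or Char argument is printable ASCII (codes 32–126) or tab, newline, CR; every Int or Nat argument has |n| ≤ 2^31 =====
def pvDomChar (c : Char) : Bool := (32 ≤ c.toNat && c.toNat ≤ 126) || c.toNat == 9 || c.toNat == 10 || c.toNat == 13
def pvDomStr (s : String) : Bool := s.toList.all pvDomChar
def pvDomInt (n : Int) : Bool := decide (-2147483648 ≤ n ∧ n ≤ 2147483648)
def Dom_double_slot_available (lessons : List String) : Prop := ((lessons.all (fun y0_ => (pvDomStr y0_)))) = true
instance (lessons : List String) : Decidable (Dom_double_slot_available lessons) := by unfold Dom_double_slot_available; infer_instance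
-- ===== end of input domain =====

-- B replaces A's stateful last_index scan with two staged passes: encode slots as '1'/'0'
-- flag characters, then answer by a substring search for "11" (alternative; return value identical).

-- ===== PORT A =====
-- loop over i in range(len(lessons)) carrying last_index, with early return True
def dsaLoopA : List String → Int → Int → Bool
  | [], _, _ => false
  | l :: rest, i, last =>
    if l = "" then
      if last = i - 1 then true
      else dsaLoopA rest (i + 1) i
    else dsaLoopA rest (i + 1) last

def double_slot_available (lessons : List String) : Bool :=
  dsaLoopA lessons 0 (-10)

-- ===== PORT B =====
-- flags = "".join("1" if lesson == "" else "0" for lesson in lessons): a join of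
-- one-character strings, ported as the corresponding list of flag characters.
def dsaFlags (lessons : List String) : List Char :=
  lessons.map (fun lesson => if lesson = "" then '1' else '0')

-- return "11" in flags
def double_slot_available_alt (lessons : List String) : Bool :=
  PySem.Chars.isIn ['1', '1'] (dsaFlags lessons)

-- ===== PRECONDITION & SPEC =====
def Spec_double_slot_available (lessons : List String) (out : Bool) : Prop := out = double_slot_available_alt lessons
instance (lessons : List String) (out : Bool) : Decidable (Spec_double_slot_available lessons out) := by unfold Spec_double_slot_available; infer_instance

-- ===== CLAIM (what is proved, stated in full; the proofs are below) =====
def Claim_equal_double_slot_available : Prop := ∀ (lessons : List String), Dom_double_slot_available lessons → Spec_double_slot_available lessons (double_slot_available lessons)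

-- ===== LEMMAS AND PROOFS =====

-- adjacency check bridging the two programs
def dsaAdjB : List String → Bool
  | a :: b :: rest => (a = "" && b = "") || dsaAdjB (b :: rest)
  | _ => false

theorem dsaAdjB_iff_infix (l : List String) :
    dsaAdjB l = true ↔ ['1', '1'] <:+: dsaFlags l := by
  induction l with
  | nil => simp [dsaAdjB, dsaFlags]
  | cons a t ih =>
    cases t with
    | nil =>
      simp only [dsaAdjB, dsaFlags, List.map]
      constructor
      · intro h; cases h
      · rintro ⟨s₁, s₂, hs⟩
        have := congrArg List.length hs
        simp at this
        omega
    | cons b t' =>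
      constructor
      · intro h
        simp only [dsaAdjB, Bool.or_eq_true, Bool.and_eq_true, decide_eq_true_eq] at h
        rcases h with ⟨ha, hb⟩ | h
        · exact ⟨[], dsaFlags t', by simp [dsaFlags, ha, hb]⟩
        · rcases ih.1 h with ⟨s₁, s₂, hs⟩
          refine ⟨(if a = "" then '1' else '0') :: s₁, s₂, ?_⟩
          simp only [dsaFlags, List.map] at hs ⊢
          rw [← hs]; rfl
      · rintro ⟨s₁, s₂, hs⟩
        simp only [dsaAdjB, Bool.or_eq_true, Bool.and_eq_true, decide_eq_true_eq]
        cases s₁ with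
        | nil =>
          left
          simp only [dsaFlags, List.map, List.nil_append, List.cons_append,
            List.cons.injEq] at hs
          obtain ⟨h1, h2, -⟩ := hs
          refine ⟨?_, ?_⟩
          · by_contra hne; simp [hne] at h1
          · by_contra hne; simp [hne] at h2
        | cons c s₁' =>
          right
          refine ih.2 ⟨s₁', s₂, ?_⟩
          simp only [dsaFlags, List.map, List.cons_append, List.cons.injEq] at hs
          exact hs.2

theorem dsaLoopA_eq (l : List String) : ∀ (i last : Int), last ≤ i - 1 →
    dsaLoopA l i last = (if last = i - 1 then dsaAdjB ("" :: l) else dsaAdjB l) := by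
  induction l with
  | nil =>
    intro i last _
    by_cases hl : last = i - 1 <;> simp [dsaLoopA, dsaAdjB, hl]
  | cons a rest ih =>
    intro i last hle
    by_cases ha : a = ""
    · subst ha
      by_cases hl : last = i - 1
      · simp [dsaLoopA, hl, dsaAdjB]
      · have := ih (i + 1) i (by omega)
        simp only [dsaLoopA, if_neg hl, this]
        cases rest <;> simp [dsaAdjB]
    · have hne : last ≠ (i + 1) - 1 := by omega
      have := ih (i + 1) last (by omega)
      simp only [dsaLoopA, if_neg ha, this, if_neg hne]
      by_cases hl : last = i - 1 <;> simp only [hl, if_pos] <;>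
        cases rest <;> simp [dsaAdjB, ha]

-- ===== VERDICT (by name: the statement is the Claim_ definition above) =====
theorem double_slot_available_spec : Claim_equal_double_slot_available := by
  intro lessons _
  unfold Spec_double_slot_available double_slot_available double_slot_available_alt
  rw [dsaLoopA_eq lessons 0 (-10) (by omega), if_neg (by omega)]
  by_cases hA : dsaAdjB lessons = true
  · rw [hA, ((PySem.Chars.isIn_iff_infix _ _).2 ((dsaAdjB_iff_infix lessons).1 hA)).symm]
  · rw [Bool.not_eq_true] at hA
    rw [hA, ((PySem.Chars.isIn_eq_false_iff _ _).2
      (fun hinf => by simp [(dsaAdjB_iff_infix lessons).2 hinf] at hA)).symm]
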